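-- pv_equiv track=rewrite | github.com/daniel-reich/ubiquitous-fiesta | HSKvp4qYA2AhDWxn6_7.py | total_points
-- ===== SOURCE A (Python) =====
-- def total_points(guesses, word):
--   word_letters = {}
--   for letter in word:
--     if not letter in word_letters.keys():
--       word_letters[letter] = 1
--     else:
--       word_letters[letter] = word_letters[letter] + 1
--
--   score = 0
--
--
--   for guess in guesses:
--     current = {}
--     valid = True
--     for letter in guess:
--       if letter in word:
--         if not letter in current.keys():
--           current[letter] = 1
--         else:
--           current[letter] = current[letter] + 1
--         if current[letter] > word_letters[letter]:
--           valid = False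
--           break
--       else:
--         valid = False
--         break
--
--     if valid:
--       score += (-2 + len(guess))
--       if len(guess) == 6:
--         score += 50
--
--   return score
-- ===== SOURCE B (Python) =====
-- def total_points(guesses, word):
--     ws = sorted(word)
--     score = 0
--     for guess in guesses:
--         gs = sorted(guess)
--         i = j = 0
--         ok = True
--         while i < len(gs):
--             if j == len(ws):
--                 ok = False
--                 break
--             if ws[j] < gs[i]:
--                 j += 1
--             elif ws[j] == gs[i]:
--                 i += 1
--                 j += 1
--             else:
--                 ok = False
--                 break
--         if ok:
--             score += len(guess) - 2
--             if len(guess) == 6: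
--                 score += 50
--     return score
-- ===== Notes on version B (the rewrite author's own statement) =====
-- stated objective: alternative
-- what changed: B sorts the word's letters once and sorts each guess, then decides validity by a two-pointer merge walk (greedy matching of the sorted guess inside the sorted word), replacing A's running-count dictionary with per-letter early break; scoring is unchanged.
import Mathlib
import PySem

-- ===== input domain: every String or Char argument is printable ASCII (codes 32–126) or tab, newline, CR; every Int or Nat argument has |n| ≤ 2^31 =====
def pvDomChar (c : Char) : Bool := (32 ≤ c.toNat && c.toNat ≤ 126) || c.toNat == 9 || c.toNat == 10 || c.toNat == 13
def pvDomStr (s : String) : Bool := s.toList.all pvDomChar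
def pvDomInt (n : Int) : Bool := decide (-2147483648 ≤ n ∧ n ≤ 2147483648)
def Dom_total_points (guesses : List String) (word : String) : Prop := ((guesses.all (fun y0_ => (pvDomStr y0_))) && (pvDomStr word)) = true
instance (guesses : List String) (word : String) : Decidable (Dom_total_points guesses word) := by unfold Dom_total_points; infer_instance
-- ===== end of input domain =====

-- B sorts the word once and each guess, then checks validity by a two-pointer merge
-- walk over the two sorted letter lists instead of A's running-count dict with early
-- break (alternative algorithm); return values are proved equal on all inputs.

-- ===== PORT A =====
-- the repeated Python pattern 'if letter not in d: d[letter]=1 else: d[letter]=d[letter]+1'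
def tpBump (d : PySem.Dict Char Int) (letter : Char) : PySem.Dict Char Int :=
  if !(d.contains letter) then d.insert letter 1
  else d.insert letter (d.getD letter 0 + 1)    -- key present in this branch, so getD is exact

def tpWordLetters (letters : List Char) : PySem.Dict Char Int :=
  letters.foldl tpBump PySem.Dict.empty

-- inner 'for letter in guess' loop with its early 'break's; 'letter in word' for a
-- 1-char letter is exactly list membership on the characters
def tpCheck (wl : PySem.Dict Char Int) (word : List Char) : List Char → PySem.Dict Char Int → Bool
  | [], _ => true
  | letter :: rest, cur =>
    if word.contains letter then
      let cur' := tpBump cur letter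
      if cur'.getD letter 0 > wl.getD letter 0 then false   -- key just set, getD exact
      else tpCheck wl word rest cur'
    else false

def total_points (guesses : List String) (word : String) : Int :=
  let wl := tpWordLetters word.toList
  guesses.foldl (fun score guess =>
    if tpCheck wl word.toList guess.toList PySem.Dict.empty then
      let score := score + (-2 + (guess.toList.length : Int))   -- len(guess)
      if guess.toList.length = 6 then score + 50 else score
    else score) 0

-- ===== PORT B =====
-- the while loop over the two index pointers, as recursion on the two sorted lists:
-- 'i < len(gs)' exhausted ↔ first list empty; 'j == len(ws)' ↔ second list empty
def tpMerge : List Char → List Char → Bool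
  | [], _ => true
  | _ :: _, [] => false
  | g :: gs, w :: ws =>
    if w < g then tpMerge (g :: gs) ws
    else if w = g then tpMerge gs ws
    else false

def total_points_alt (guesses : List String) (word : String) : Int :=
  let ws := PySem.List.sorted word.toList (fun c => c) false
  guesses.foldl (fun score guess =>
    let gs := PySem.List.sorted guess.toList (fun c => c) false
    if tpMerge gs ws then
      let score := score + ((guess.toList.length : Int) - 2)
      if guess.toList.length = 6 then score + 50 else score
    else score) 0

-- ===== PRECONDITION & SPEC =====
def Spec_total_points (guesses : List String) (word : String) (out : Int) : Prop := out = total_points_alt guesses word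
instance (guesses : List String) (word : String) (out : Int) : Decidable (Spec_total_points guesses word out) := by unfold Spec_total_points; infer_instance

-- ===== CLAIM (what is proved, stated in full; the proofs are below) =====
def Claim_equal_total_points : Prop := ∀ (guesses : List String) (word : String), Dom_total_points guesses word → Spec_total_points guesses word (total_points guesses word)

-- ===== LEMMAS AND PROOFS =====

-- A-side: characterise tpCheck as the per-letter count condition
theorem tpBump_eq (d : PySem.Dict Char Int) (c : Char) :
    tpBump d c = d.insert c (d.getD c 0 + 1) := by
  unfold tpBump
  by_cases h : d.contains c
  · simp [h]
  · have h' : d.contains c = false := by simpa using h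
    have h0 : d.getD c 0 = 0 := PySem.Dict.getD_of_not_contains d 0 h'
    simp [h', h0]

theorem tpBump_getD (d : PySem.Dict Char Int) (c v : Char) :
    (tpBump d c).getD v 0 = if v = c then d.getD v 0 + 1 else d.getD v 0 := by
  rw [tpBump_eq, PySem.Dict.getD_insert]
  split_ifs with h
  · subst h; rfl
  · rfl

theorem tpWordLetters_getD (w : List Char) (c : Char) :
    (tpWordLetters w).getD c 0 = (w.count c : Int) := by
  unfold tpWordLetters
  have : w.foldl tpBump PySem.Dict.empty
      = w.foldl (fun d x => d.insert x (d.getD x 0 + 1)) PySem.Dict.empty := by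
    apply PySem.List.foldl_congr_mem
    intro acc x _
    exact tpBump_eq acc x
  rw [this, PySem.Dict.getD_foldl_insert_add_one, PySem.Dict.getD_empty]
  ring

theorem count_append_singleton (p : List Char) (letter c : Char) :
    (p ++ [letter]).count c = if c = letter then p.count c + 1 else p.count c := by
  rcases eq_or_ne c letter with hc | hc
  · subst hc; simp
  · have h0 : List.count c [letter] = 0 := List.count_eq_zero.mpr (by simp [hc])
    simp [List.count_append, h0, hc]

theorem tpCheck_iff (wl : PySem.Dict Char Int) (w : List Char)
    (hwl : ∀ c, wl.getD c 0 = (w.count c : Int)) :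
    ∀ (rest p : List Char) (cur : PySem.Dict Char Int),
      (∀ c, cur.getD c 0 = (p.count c : Int)) →
      (tpCheck wl w rest cur = true ↔ ∀ c ∈ rest, (p ++ rest).count c ≤ w.count c) := by
  intro rest
  induction rest with
  | nil => intro p cur _; simp [tpCheck]
  | cons letter rest ih =>
    intro p cur hcur
    have hcnt : (p ++ letter :: rest).count letter
        = p.count letter + rest.count letter + 1 := by
      simp [List.count_append]
      omega
    by_cases hmem : letter ∈ w
    · have hcont : w.contains letter = true := by simpa using hmem
      have hcur' : ∀ c, (tpBump cur letter).getD c 0 = ((p ++ [letter]).count c : Int) := by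
        intro c
        rw [tpBump_getD, hcur c, count_append_singleton]
        rcases eq_or_ne c letter with hc | hc
        · simp [hc]
        · simp [hc]
      have hgd : (tpBump cur letter).getD letter 0 = (p.count letter : Int) + 1 := by
        rw [hcur' letter, count_append_singleton]; simp
      by_cases hbreak : (w.count letter : Int) < (p.count letter : Int) + 1
      · have hL : tpCheck wl w (letter :: rest) cur = false := by
          simp only [tpCheck, hcont, if_true]
          have hgt : (tpBump cur letter).getD letter 0 > wl.getD letter 0 := by
            rw [hgd, hwl letter]; omega
          simp [hgt]
        rw [hL]
        constructor
        · intro h; cases h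
        · intro h
          exfalso
          have := h letter (by simp)
          rw [hcnt] at this
          omega
      · have hL : tpCheck wl w (letter :: rest) cur = tpCheck wl w rest (tpBump cur letter) := by
          simp only [tpCheck, hcont, if_true]
          have hle : ¬ ((tpBump cur letter).getD letter 0 > wl.getD letter 0) := by
            rw [hgd, hwl letter]; omega
          simp [hle]
        rw [hL, ih (p ++ [letter]) (tpBump cur letter) hcur']
        have hassoc : (p ++ [letter]) ++ rest = p ++ letter :: rest := by simp
        rw [hassoc]
        constructor
        · intro h c hc
          rcases (List.mem_cons.mp hc) with hc | hc
          · subst hc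
            by_cases hr : c ∈ rest
            · exact h c hr
            · have h0 : rest.count c = 0 := List.count_eq_zero.mpr hr
              rw [hcnt, h0]
              omega
          · exact h c hc
        · intro h c hc; exact h c (List.mem_cons_of_mem _ hc)
    · have hcont : w.contains letter = false := by simpa using hmem
      have hL : tpCheck wl w (letter :: rest) cur = false := by
        simp [tpCheck, hmem]
      rw [hL]
      constructor
      · intro h; cases h
      · intro h
        exfalso
        have := h letter (by simp)
        have h0 : w.count letter = 0 := List.count_eq_zero.mpr hmem
        rw [hcnt, h0] at this
        omega

theorem tpCheck_eq_all (word guess : List Char) :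
    tpCheck (tpWordLetters word) word guess PySem.Dict.empty
      = guess.all (fun c => guess.count c ≤ word.count c) := by
  rw [Bool.eq_iff_iff]
  rw [tpCheck_iff (tpWordLetters word) word (tpWordLetters_getD word) guess []
        PySem.Dict.empty (by intro c; simp [PySem.Dict.getD_empty])]
  simp

-- B-side: the merge walk on two (≤)-sorted lists decides the per-letter count condition
theorem tpMerge_iff : ∀ (ws gs : List Char), gs.Pairwise (· ≤ ·) → ws.Pairwise (· ≤ ·) →
    (tpMerge gs ws = true ↔ ∀ c ∈ gs, gs.count c ≤ ws.count c) := by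
  intro ws
  induction ws with
  | nil =>
    intro gs _ _
    cases gs with
    | nil => simp [tpMerge]
    | cons g gs' =>
      simp only [tpMerge]
      constructor
      · intro h; cases h
      · intro h
        have := h g (by simp)
        simp at this
  | cons w ws' ih =>
    intro gs hgs hws
    have hws' : ws'.Pairwise (· ≤ ·) := hws.tail
    cases gs with
    | nil => simp [tpMerge]
    | cons g gs' =>
      have hgs' : gs'.Pairwise (· ≤ ·) := hgs.tail
      have hg_le : ∀ c ∈ gs', g ≤ c := by
        intro c hc; exact List.rel_of_pairwise_cons hgs hc
      have hw_le : ∀ c ∈ ws', w ≤ c := by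
        intro c hc; exact List.rel_of_pairwise_cons hws hc
      rcases lt_trichotomy w g with hlt | heq | hgt
      · -- w < g : skip w; no letter of gs occurs as w
        have hstep : tpMerge (g :: gs') (w :: ws') = tpMerge (g :: gs') ws' := by
          simp [tpMerge, hlt]
        rw [hstep, ih (g :: gs') hgs hws']
        have hne : ∀ c ∈ g :: gs', (w :: ws').count c = ws'.count c := by
          intro c hc
          have hwc : w < c := by
            rcases List.mem_cons.mp hc with h | h
            · subst h; exact hlt
            · exact lt_of_lt_of_le hlt (hg_le c h)
          simp [ne_of_lt hwc]
        constructor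
        · intro h c hc; rw [hne c hc]; exact h c hc
        · intro h c hc; rw [← hne c hc]; exact h c hc
      · -- w = g : match
        subst heq
        have hstep : tpMerge (w :: gs') (w :: ws') = tpMerge gs' ws' := by
          simp [tpMerge]
        rw [hstep, ih gs' hgs' hws']
        constructor
        · intro h c hc
          rcases eq_or_ne c w with hcw | hcw
          · subst hcw
            have hcg : gs'.count c ≤ ws'.count c := by
              by_cases hr : c ∈ gs'
              · exact h c hr
              · rw [List.count_eq_zero.mpr hr]; omega
            simp
            omega
          · have hcg : c ∈ gs' := by
              rcases List.mem_cons.mp hc with h' | h'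
              · exact absurd h' hcw
              · exact h'
            have := h c hcg
            simp [List.count_cons]
            omega
        · intro h c hc
          have := h c (List.mem_cons_of_mem _ hc)
          rcases eq_or_ne c w with hcw | hcw
          · subst hcw
            simp at this
            omega
          · simp [List.count_cons] at this
            omega
      · -- g < w : mismatch; g does not occur in w :: ws'
        have hstep : tpMerge (g :: gs') (w :: ws') = false := by
          have h1 : ¬ (w < g) := not_lt_of_gt hgt
          have h2 : w ≠ g := ne_of_gt hgt
          simp [tpMerge, h1, h2]
        rw [hstep]
        constructor
        · intro h; cases h
        · intro h
          exfalso
          have := h g (by simp)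
          have h0 : (w :: ws').count g = 0 := by
            apply List.count_eq_zero.mpr
            intro hmem
            rcases List.mem_cons.mp hmem with h' | h'
            · exact absurd h'.symm (ne_of_gt hgt)
            · exact absurd (hw_le g h') (not_le_of_gt hgt)
          rw [h0] at this
          have : (g :: gs').count g = 0 := by omega
          simp at this

theorem tpMerge_sorted_eq_all (word guess : List Char) :
    tpMerge (PySem.List.sorted guess (fun c => c) false) (PySem.List.sorted word (fun c => c) false)
      = guess.all (fun c => guess.count c ≤ word.count c) := by
  have hpg : (PySem.List.sorted guess (fun c => c) false).Pairwise (· ≤ ·) := by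
    have := PySem.List.sorted_pairwise guess (fun c => c)
    simpa using this
  have hpw : (PySem.List.sorted word (fun c => c) false).Pairwise (· ≤ ·) := by
    have := PySem.List.sorted_pairwise word (fun c => c)
    simpa using this
  have hper_g : (PySem.List.sorted guess (fun c => c) false).Perm guess :=
    PySem.List.sorted_perm guess (fun c => c) false
  have hper_w : (PySem.List.sorted word (fun c => c) false).Perm word :=
    PySem.List.sorted_perm word (fun c => c) false
  rw [Bool.eq_iff_iff, tpMerge_iff _ _ hpg hpw]
  constructor
  · intro h
    simp only [List.all_eq_true, decide_eq_true_eq]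
    intro c hc
    have := h c ((hper_g.mem_iff).mpr hc)
    rwa [hper_g.count_eq, hper_w.count_eq] at this
  · intro h c hc
    simp only [List.all_eq_true, decide_eq_true_eq] at h
    have := h c ((hper_g.mem_iff).mp hc)
    rwa [hper_g.count_eq, hper_w.count_eq]

-- ===== VERDICT (by name: the statement is the Claim_ definition above) =====
theorem total_points_spec : Claim_equal_total_points := by
  intro guesses word _
  unfold Spec_total_points total_points total_points_alt
  apply PySem.List.foldl_congr_mem
  intro score guess _
  rw [tpCheck_eq_all word.toList guess.toList, ← tpMerge_sorted_eq_all word.toList guess.toList]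
  by_cases h : tpMerge (PySem.List.sorted guess.toList (fun c => c) false)
      (PySem.List.sorted word.toList (fun c => c) false) = true
  · simp only [h, if_true]
    have : score + (-2 + (guess.toList.length : Int)) = score + ((guess.toList.length : Int) - 2) := by ring
    rw [this]
  · simp [h]
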